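-- pv_equiv track=rewrite | github.com/KwonTaeyong/Python_v7 | learning138.py | solution
-- ===== SOURCE A (Python) =====
-- from collections import deque
--
-- def solution(grid):
--     n, m = len(grid), len(grid[0])
--     grid = [list(row) for row in grid]
--
--     # 눈덩이 위치 찾기
--     snowballs = []
--     for i in range(n):
--         for j in range(m):
--             if grid[i][j] == 'o':
--                 snowballs.append((i, j))
--
--     # BFS로 한 눈덩이가 도달 가능한 눈(.) 개수 계산
--     def max_size(start):
--         q = deque([start])
--         visited = set([start])
--         snow = 0
--
--         while q:
--             x, y = q.popleft()
--             for dx, dy in [(-1,0),(1,0),(0,-1),(0,1)]: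
--                 nx, ny = x + dx, y + dy
--                 if 0 <= nx < n and 0 <= ny < m:
--                     if (nx, ny) not in visited and grid[nx][ny] != '#':
--                         visited.add((nx, ny))
--                         q.append((nx, ny))
--                         if grid[nx][ny] == '.':
--                             snow += 1
--
--         return snow + 1  # 초기 크기 1 포함
--
--     a = max_size(snowballs[0])
--     b = max_size(snowballs[1])
--
--     # 가능한 눈사람 종류 세기
--     max_body = max(a, b)
--     max_head = min(a, b)
--
--     answer = 0
--     for body in range(1, max_body + 1):
--         answer += min(body, max_head)
--
--     return answer
-- ===== SOURCE B (Python) =====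
-- def solution(grid):
--     n, m = len(grid), len(grid[0])
--
--     # first two snowball positions, via one comprehension instead of nested append loops
--     starts = [(i, j) for i in range(n) for j in range(m) if grid[i][j] == 'o'][:2]
--
--     # iterative DFS (explicit stack) flood fill; count '.' cells of the region once at the end
--     def region_size(start):
--         seen = {start}
--         stack = [start]
--         while stack:
--             x, y = stack.pop()
--             for c in ((x - 1, y), (x + 1, y), (x, y - 1), (x, y + 1)):
--                 if 0 <= c[0] < n and 0 <= c[1] < m and c not in seen and grid[c[0]][c[1]] != '#':
--                     seen.add(c)
--                     stack.append(c)
--         return 1 + sum(1 for (x, y) in seen if grid[x][y] == '.')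
--
--     a = region_size(starts[0])
--     b = region_size(starts[1])
--
--     # closed-form value of sum_{body=1}^{max(a,b)} min(body, min(a,b))
--     h, bd = min(a, b), max(a, b)
--     return h * (h + 1) // 2 + (bd - h) * h
-- ===== Notes on version B (the rewrite author's own statement) =====
-- stated objective: alternative
-- what changed: The BFS-with-incremental-snow-counter per snowball is replaced by an explicit-stack DFS that counts '.' cells of the region once at the end, and the final O(max(a,b)) accumulation loop is replaced by the closed-form h*(h+1)//2 + (bd-h)*h for sum_{body=1}^{bd} min(body,h).
import Mathlib
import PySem

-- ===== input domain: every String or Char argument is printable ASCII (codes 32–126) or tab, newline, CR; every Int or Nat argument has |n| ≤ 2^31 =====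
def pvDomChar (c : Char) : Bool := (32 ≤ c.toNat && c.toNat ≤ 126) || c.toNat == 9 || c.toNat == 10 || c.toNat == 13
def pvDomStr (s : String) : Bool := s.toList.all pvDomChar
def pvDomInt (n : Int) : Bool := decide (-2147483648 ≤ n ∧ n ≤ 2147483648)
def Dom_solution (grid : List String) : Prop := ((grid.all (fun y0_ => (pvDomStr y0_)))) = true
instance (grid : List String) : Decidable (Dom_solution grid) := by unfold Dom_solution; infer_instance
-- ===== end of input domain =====

-- B replaces A's per-snowball BFS-with-running-counter by an explicit-stack DFS that counts '.'
-- cells of the region at the end, and A's final accumulation loop by a closed-form formula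
-- (objective: alternative).


-- ===== PORT A =====
def pvGridA (grid : List String) : List (List Char) := grid.map (fun r => r.toList)

-- grid[x][y]; every access in A is guarded by 0 ≤ x < n ∧ 0 ≤ y < m (and Pre_ gives rows of
-- length ≥ m), so the defaults never fire on admitted inputs
def pvCellA (g : List (List Char)) (x y : Int) : Char := (g.getD x.toNat []).getD y.toNat '#'

def pvDirs : List (Int × Int) := [(-1, 0), (1, 0), (0, -1), (0, 1)]

def pvSnowballsA (g : List (List Char)) (n m : Int) : List (Int × Int) :=
  (PySem.List.pyRange 0 n 1).foldl (fun acc i =>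
    (PySem.List.pyRange 0 m 1).foldl (fun acc j =>
      if pvCellA g i j = 'o' then acc ++ [(i, j)] else acc) acc) []

-- body of A's inner 'for dx, dy in [...]' loop
def pvStepA (g : List (List Char)) (n m x y : Int)
    (st : List (Int × Int) × PySem.Set (Int × Int) × Int) (d : Int × Int) :
    List (Int × Int) × PySem.Set (Int × Int) × Int :=
  let nx := x + d.1
  let ny := y + d.2
  if 0 ≤ nx ∧ nx < n ∧ 0 ≤ ny ∧ ny < m then
    if (nx, ny) ∉ st.2.1 ∧ pvCellA g nx ny ≠ '#' then
      (st.1 ++ [(nx, ny)], PySem.Set.add st.2.1 (nx, ny),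
        if pvCellA g nx ny = '.' then st.2.2 + 1 else st.2.2)
    else st
  else st

-- A's 'while q' loop; the fuel n*m+1 only makes the recursion total — lemma pvBfsA_run below
-- shows the queue is always empty before it runs out
def pvBfsA (g : List (List Char)) (n m : Int) :
    Nat → List (Int × Int) → PySem.Set (Int × Int) → Int → PySem.Set (Int × Int) × Int
  | 0, _, vis, snow => (vis, snow)
  | _ + 1, [], vis, snow => (vis, snow)
  | fuel + 1, (x, y) :: q, vis, snow =>
    let st := pvDirs.foldl (pvStepA g n m x y) (q, vis, snow)
    pvBfsA g n m fuel st.1 st.2.1 st.2.2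

def pvMaxSizeA (g : List (List Char)) (n m : Int) (start : Int × Int) : Int :=
  (pvBfsA g n m (n.toNat * m.toNat + 1) [start] (PySem.Set.ofList [start]) 0).2 + 1

def solution (grid : List String) : Int :=
  let g := pvGridA grid
  let n : Int := g.length
  let m : Int := (g.getD 0 []).length          -- len(grid[0]); Pre_ excludes the empty grid
  let snowballs := pvSnowballsA g n m
  let a := pvMaxSizeA g n m (snowballs.getD 0 (0, 0))   -- snowballs[0] / snowballs[1];
  let b := pvMaxSizeA g n m (snowballs.getD 1 (0, 0))   -- Pre_ guarantees both exist
  let maxBody := max a b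
  let maxHead := min a b
  (PySem.List.pyRange 1 (maxBody + 1) 1).foldl (fun answer body => answer + min body maxHead) 0

-- ===== PORT B =====
def pvGridB (grid : List String) : List (List Char) := grid.map (fun r => r.toList)

def pvCharB (g : List (List Char)) (c : Int × Int) : Char := (g.getD c.1.toNat []).getD c.2.toNat '#'

def pvStartsB (g : List (List Char)) (n m : Int) : List (Int × Int) :=
  ((PySem.List.pyRange 0 n 1).flatMap (fun i =>
    ((PySem.List.pyRange 0 m 1).filter (fun j => pvCharB g (i, j) == 'o')).map
      (fun j => ((i, j) : Int × Int)))).take 2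

-- B's '_neighbors(x, y)'
def pvNbrsB (c : Int × Int) : List (Int × Int) :=
  [(c.1 - 1, c.2), (c.1 + 1, c.2), (c.1, c.2 - 1), (c.1, c.2 + 1)]

-- body of B's 'for c in _neighbors(x, y)' loop
def pvStepB (g : List (List Char)) (n m : Int)
    (st : List (Int × Int) × PySem.Set (Int × Int)) (c : Int × Int) :
    List (Int × Int) × PySem.Set (Int × Int) :=
  if 0 ≤ c.1 ∧ c.1 < n ∧ 0 ≤ c.2 ∧ c.2 < m ∧ c ∉ st.2 ∧ pvCharB g c ≠ '#' then
    (st.1 ++ [c], PySem.Set.add st.2 c)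
  else st

-- B's 'while stack' loop (stack.pop() pops the END); fuel as in pvBfsA
def pvDfsB (g : List (List Char)) (n m : Int) :
    Nat → List (Int × Int) → PySem.Set (Int × Int) → PySem.Set (Int × Int)
  | 0, _, seen => seen
  | fuel + 1, stack, seen =>
    match stack.getLast? with
    | none => seen
    | some c =>
      let st := (pvNbrsB c).foldl (pvStepB g n m) (stack.dropLast, seen)
      pvDfsB g n m fuel st.1 st.2

def pvRegionB (g : List (List Char)) (n m : Int) (start : Int × Int) : Int :=
  let seen := pvDfsB g n m (n.toNat * m.toNat + 1) [start] (PySem.Set.ofList [start])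
  1 + ((seen.filter (fun c => pvCharB g c == '.')).length : Int)

def solution_alt (grid : List String) : Int :=
  let g := pvGridB grid
  let n : Int := g.length
  let m : Int := (g.getD 0 []).length
  let starts := pvStartsB g n m
  let a := pvRegionB g n m (starts.getD 0 (0, 0))
  let b := pvRegionB g n m (starts.getD 1 (0, 0))
  let h := min a b
  let bd := max a b
  PySem.Int.floordiv (h * (h + 1)) 2 + (bd - h) * h

-- ===== PRECONDITION & SPEC =====
-- Pre_ excludes exactly the inputs where A raises: the empty grid (grid[0] → IndexError), a grid
-- with a row shorter than the first row (grid[i][j] → IndexError during the snowball scan), and a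
-- grid with fewer than two 'o' cells in the first len(grid[0]) columns (snowballs[1] → IndexError).
def Pre_solution (grid : List String) : Prop :=
  grid ≠ [] ∧
  (∀ r ∈ grid, (grid.headI).toList.length ≤ r.toList.length) ∧
  2 ≤ (grid.map (fun r => (r.toList.take (grid.headI).toList.length).count 'o')).sum

instance (grid : List String) : Decidable (Pre_solution grid) := by
  unfold Pre_solution; infer_instance

def pvWitness_solution : List String := ["o.o"]

def Spec_solution (grid : List String) (out : Int) : Prop := out = solution_alt grid
instance (grid : List String) (out : Int) : Decidable (Spec_solution grid out) := by
  unfold Spec_solution; infer_instance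

-- ===== CLAIM (what is proved, stated in full; the proofs are below) =====
def Claim_equal_solution : Prop :=
  ∀ (grid : List String), Dom_solution grid → Pre_solution grid →
    Spec_solution grid (solution grid)

-- ===== LEMMAS AND PROOFS =====

-- proof-side vocabulary -------------------------------------------------------------------------
abbrev pvInb (n m : Int) (c : Int × Int) : Prop := 0 ≤ c.1 ∧ c.1 < n ∧ 0 ≤ c.2 ∧ c.2 < m

abbrev pvGood (g : List (List Char)) (n m : Int) (c : Int × Int) : Prop :=
  pvInb n m c ∧ pvCellA g c.1 c.2 ≠ '#'

inductive pvReach (g : List (List Char)) (n m : Int) (s : Int × Int) : (Int × Int) → Prop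
  | refl : pvReach g n m s s
  | step {c d : Int × Int} : pvReach g n m s c → d ∈ pvNbrsB c → pvGood g n m d →
      pvReach g n m s d

def pvDotCount (g : List (List Char)) (l : List (Int × Int)) : Nat :=
  (l.filter (fun c => pvCellA g c.1 c.2 == '.')).length

theorem pvDotCount_append (g : List (List Char)) (l1 l2 : List (Int × Int)) :
    pvDotCount g (l1 ++ l2) = pvDotCount g l1 + pvDotCount g l2 := by
  simp [pvDotCount, List.filter_append]

theorem beq_char (a b : Char) : (a == b) = decide (a = b) := by
  by_cases h : a = b <;> simp [h]

theorem mem_pvNbrsB_iff (x y : Int) (c : Int × Int) :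
    c ∈ pvNbrsB (x, y) ↔ ∃ d ∈ pvDirs, c = (x + d.1, y + d.2) := by
  have e1 : ((x - 1, y) : Int × Int) = (x + (-1 : Int), y + 0) := by
    rw [Prod.mk.injEq]; constructor <;> ring
  have e2 : ((x + 1, y) : Int × Int) = (x + 1, y + 0) := by
    rw [Prod.mk.injEq]; constructor <;> ring
  have e3 : ((x, y - 1) : Int × Int) = (x + 0, y + (-1 : Int)) := by
    rw [Prod.mk.injEq]; constructor <;> ring
  have e4 : ((x, y + 1) : Int × Int) = (x + 0, y + 1) := by
    rw [Prod.mk.injEq]; constructor <;> ring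
  simp only [pvNbrsB, pvDirs, List.mem_cons, List.not_mem_nil, or_false, e1, e2, e3, e4]
  constructor
  · rintro (rfl | rfl | rfl | rfl)
    · exact ⟨(-1, 0), Or.inl rfl, rfl⟩
    · exact ⟨(1, 0), Or.inr (Or.inl rfl), rfl⟩
    · exact ⟨(0, -1), Or.inr (Or.inr (Or.inl rfl)), rfl⟩
    · exact ⟨(0, 1), Or.inr (Or.inr (Or.inr rfl)), rfl⟩
  · rintro ⟨d, (rfl | rfl | rfl | rfl), rfl⟩
    · exact Or.inl rfl
    · exact Or.inr (Or.inl rfl)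
    · exact Or.inr (Or.inr (Or.inl rfl))
    · exact Or.inr (Or.inr (Or.inr rfl))

-- inner fold of B: appends one block 'new' to both stack and seen ------------------------------
theorem foldB_spec (g : List (List Char)) (n m : Int) (cand : List (Int × Int)) :
    ∀ (q : List (Int × Int)) (vis : PySem.Set (Int × Int)), vis.Nodup →
    ∃ new : List (Int × Int),
      cand.foldl (pvStepB g n m) (q, vis) = (q ++ new, vis ++ new) ∧
      (vis ++ new).Nodup ∧
      (∀ c ∈ new, c ∈ cand ∧ pvGood g n m c ∧ c ∉ vis) ∧
      (∀ c ∈ cand, pvGood g n m c → c ∈ vis ++ new) := by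
  induction cand with
  | nil =>
    intro q vis hnd
    exact ⟨[], by simp, by simpa using hnd, by simp, by simp⟩
  | cons c cs ih =>
    intro q vis hnd
    by_cases hc : 0 ≤ c.1 ∧ c.1 < n ∧ 0 ≤ c.2 ∧ c.2 < m ∧ c ∉ vis ∧ pvCharB g c ≠ '#'
    · have hcv : c ∉ vis := hc.2.2.2.2.1
      have hadd : PySem.Set.add vis c = vis ++ [c] := by
        simp [PySem.Set.add, PySem.Set.contains, hcv]
      have hstep : pvStepB g n m (q, vis) c = (q ++ [c], vis ++ [c]) := by
        simp [pvStepB, hc]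
      have hnd1 : (vis ++ [c]).Nodup := by
        rw [List.nodup_append]
        refine ⟨hnd, by simp, ?_⟩
        intro a ha b hb
        simp only [List.mem_singleton] at hb
        subst hb
        exact fun h => hcv (h ▸ ha)
      obtain ⟨new, heq, hnd2, hmem, hcov⟩ := ih (q ++ [c]) (vis ++ [c]) hnd1
      refine ⟨c :: new, ?_, ?_, ?_, ?_⟩
      · rw [List.foldl_cons, hstep, heq]; simp
      · have hre : vis ++ c :: new = (vis ++ [c]) ++ new := by simp
        rw [hre]; exact hnd2
      · intro d hd
        rcases List.mem_cons.mp hd with rfl | hd'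
        · exact ⟨List.mem_cons_self, ⟨⟨hc.1, hc.2.1, hc.2.2.1, hc.2.2.2.1⟩, hc.2.2.2.2.2⟩, hcv⟩
        · obtain ⟨h1, h2, h3⟩ := hmem d hd'
          exact ⟨List.mem_cons_of_mem _ h1, h2, fun hdv => h3 (List.mem_append_left _ hdv)⟩
      · intro d hd hg
        have hre : vis ++ c :: new = (vis ++ [c]) ++ new := by simp
        rcases List.mem_cons.mp hd with rfl | hd'
        · rw [hre]; exact List.mem_append_left _ (by simp)
        · rw [hre]; exact hcov d hd' hg
    · have hstep : pvStepB g n m (q, vis) c = (q, vis) := by simp [pvStepB, hc]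
      obtain ⟨new, heq, hnd2, hmem, hcov⟩ := ih q vis hnd
      refine ⟨new, by rw [List.foldl_cons, hstep]; exact heq, hnd2, ?_, ?_⟩
      · intro d hd
        obtain ⟨h1, h2, h3⟩ := hmem d hd
        exact ⟨List.mem_cons_of_mem _ h1, h2, h3⟩
      · intro d hd hg
        rcases List.mem_cons.mp hd with rfl | hd'
        · have hdv : d ∈ vis := by
            by_contra hdv
            exact hc ⟨hg.1.1, hg.1.2.1, hg.1.2.2.1, hg.1.2.2.2, hdv, hg.2⟩
          exact List.mem_append_left _ hdv
        · exact hcov d hd' hg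

-- inner fold of A over a sublist of the direction list ------------------------------------------
theorem foldA_aux (g : List (List Char)) (n m x y : Int) (cand : List (Int × Int)) :
    ∀ (q : List (Int × Int)) (vis : PySem.Set (Int × Int)) (snow : Int), vis.Nodup →
    ∃ new : List (Int × Int),
      cand.foldl (pvStepA g n m x y) (q, vis, snow) =
        (q ++ new, vis ++ new, snow + (pvDotCount g new : Int)) ∧
      (vis ++ new).Nodup ∧
      (∀ c ∈ new, (∃ d ∈ cand, c = (x + d.1, y + d.2)) ∧ pvGood g n m c ∧ c ∉ vis) ∧
      (∀ d ∈ cand, pvGood g n m (x + d.1, y + d.2) → (x + d.1, y + d.2) ∈ vis ++ new) := by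
  induction cand with
  | nil =>
    intro q vis snow hnd
    exact ⟨[], by simp [pvDotCount], by simpa using hnd, by simp, by simp⟩
  | cons e es ih =>
    intro q vis snow hnd
    by_cases hb : 0 ≤ x + e.1 ∧ x + e.1 < n ∧ 0 ≤ y + e.2 ∧ y + e.2 < m
    · by_cases hv : (x + e.1, y + e.2) ∉ vis ∧ pvCellA g (x + e.1) (y + e.2) ≠ '#'
      · have hadd : PySem.Set.add vis (x + e.1, y + e.2) = vis ++ [(x + e.1, y + e.2)] := by
          simp [PySem.Set.add, PySem.Set.contains, hv.1]
        have hstep : pvStepA g n m x y (q, vis, snow) e =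
            (q ++ [(x + e.1, y + e.2)], vis ++ [(x + e.1, y + e.2)],
              snow + (pvDotCount g [(x + e.1, y + e.2)] : Int)) := by
          simp only [pvStepA]
          rw [if_pos hb, if_pos hv, hadd]
          by_cases hdot : pvCellA g (x + e.1) (y + e.2) = '.' <;>
            simp [pvDotCount, hdot]
        have hnd1 : (vis ++ [(x + e.1, y + e.2)]).Nodup := by
          rw [List.nodup_append]
          refine ⟨hnd, by simp, ?_⟩
          intro a ha b hb
          simp only [List.mem_singleton] at hb
          subst hb
          exact fun h => hv.1 (h ▸ ha)
        obtain ⟨new, heq, hnd2, hmem, hcov⟩ :=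
          ih (q ++ [(x + e.1, y + e.2)]) (vis ++ [(x + e.1, y + e.2)])
            (snow + (pvDotCount g [(x + e.1, y + e.2)] : Int)) hnd1
        refine ⟨(x + e.1, y + e.2) :: new, ?_, ?_, ?_, ?_⟩
        · rw [List.foldl_cons, hstep, heq]
          have hre : (x + e.1, y + e.2) :: new = [(x + e.1, y + e.2)] ++ new := rfl
          rw [hre, ← List.append_assoc, ← List.append_assoc, pvDotCount_append]
          congr 1
          · congr 1
            push_cast
            ring
        · have hre : vis ++ (x + e.1, y + e.2) :: new = (vis ++ [(x + e.1, y + e.2)]) ++ new := by simp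
          rw [hre]; exact hnd2
        · intro c hcmem
          rcases List.mem_cons.mp hcmem with rfl | hd'
          · exact ⟨⟨e, List.mem_cons_self, rfl⟩,
              ⟨⟨hb.1, hb.2.1, hb.2.2.1, hb.2.2.2⟩, hv.2⟩, hv.1⟩
          · obtain ⟨⟨d, hdm, hde⟩, h2, h3⟩ := hmem c hd'
            exact ⟨⟨d, List.mem_cons_of_mem _ hdm, hde⟩, h2,
              fun hcv => h3 (List.mem_append_left _ hcv)⟩
        · intro d hd hg
          have hre : vis ++ (x + e.1, y + e.2) :: new = (vis ++ [(x + e.1, y + e.2)]) ++ new := by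
            simp
          rcases List.mem_cons.mp hd with rfl | hd'
          · rw [hre]; exact List.mem_append_left _ (by simp)
          · rw [hre]; exact hcov d hd' hg
      · have hstep : pvStepA g n m x y (q, vis, snow) e = (q, vis, snow) := by
          simp only [pvStepA]
          rw [if_pos hb, if_neg hv]
        obtain ⟨new, heq, hnd2, hmem, hcov⟩ := ih q vis snow hnd
        refine ⟨new, by rw [List.foldl_cons, hstep]; exact heq, hnd2, ?_, ?_⟩
        · intro c hcmem
          obtain ⟨⟨d, hdm, hde⟩, h2, h3⟩ := hmem c hcmem
          exact ⟨⟨d, List.mem_cons_of_mem _ hdm, hde⟩, h2, h3⟩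
        · intro d hd hg
          rcases List.mem_cons.mp hd with rfl | hd'
          · have hdv : (x + d.1, y + d.2) ∈ vis := by
              by_contra hdv
              exact hv ⟨hdv, hg.2⟩
            exact List.mem_append_left _ hdv
          · exact hcov d hd' hg
    · have hstep : pvStepA g n m x y (q, vis, snow) e = (q, vis, snow) := by
        simp only [pvStepA]
        rw [if_neg hb]
      obtain ⟨new, heq, hnd2, hmem, hcov⟩ := ih q vis snow hnd
      refine ⟨new, by rw [List.foldl_cons, hstep]; exact heq, hnd2, ?_, ?_⟩
      · intro c hcmem
        obtain ⟨⟨d, hdm, hde⟩, h2, h3⟩ := hmem c hcmem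
        exact ⟨⟨d, List.mem_cons_of_mem _ hdm, hde⟩, h2, h3⟩
      · intro d hd hg
        rcases List.mem_cons.mp hd with rfl | hd'
        · exact absurd ⟨hg.1.1, hg.1.2.1, hg.1.2.2.1, hg.1.2.2.2⟩ hb
        · exact hcov d hd' hg

theorem foldA_spec (g : List (List Char)) (n m x y : Int) :
    ∀ (q : List (Int × Int)) (vis : PySem.Set (Int × Int)) (snow : Int), vis.Nodup →
    ∃ new : List (Int × Int),
      pvDirs.foldl (pvStepA g n m x y) (q, vis, snow) =
        (q ++ new, vis ++ new, snow + (pvDotCount g new : Int)) ∧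
      (vis ++ new).Nodup ∧
      (∀ c ∈ new, c ∈ pvNbrsB (x, y) ∧ pvGood g n m c ∧ c ∉ vis) ∧
      (∀ c ∈ pvNbrsB (x, y), pvGood g n m c → c ∈ vis ++ new) := by
  intro q vis snow hnd
  obtain ⟨new, heq, hnd2, hmem, hcov⟩ := foldA_aux g n m x y pvDirs q vis snow hnd
  refine ⟨new, heq, hnd2, fun c hc => ?_, fun c hc hg => ?_⟩
  · obtain ⟨h1, h2, h3⟩ := hmem c hc
    exact ⟨(mem_pvNbrsB_iff x y c).2 h1, h2, h3⟩
  · obtain ⟨d, hd, rfl⟩ := (mem_pvNbrsB_iff x y c).1 hc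
    exact hcov d hd hg

-- a nodup list of in-bounds cells has at most n*m elements -------------------------------------
theorem pvInb_card (n m : Int) (l : List (Int × Int)) (hnd : l.Nodup)
    (hin : ∀ c ∈ l, pvInb n m c) : l.length ≤ n.toNat * m.toNat := by
  classical
  have hmnd : (l.map (fun c => (c.1.toNat, c.2.toNat))).Nodup := by
    refine hnd.map_on ?_
    intro a ha b hb hab
    have ha' := hin a ha
    have hb' := hin b hb
    have h1 : a.1.toNat = b.1.toNat ∧ a.2.toNat = b.2.toNat := by
      simpa [Prod.ext_iff] using hab
    have h2 : a.1 = b.1 ∧ a.2 = b.2 := by omega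
    exact Prod.ext h2.1 h2.2
  have hsub : (l.map (fun c => (c.1.toNat, c.2.toNat))).toFinset ⊆
      Finset.range n.toNat ×ˢ Finset.range m.toNat := by
    intro p hp
    simp only [List.mem_toFinset, List.mem_map] at hp
    obtain ⟨c, hc, rfl⟩ := hp
    have := hin c hc
    simp only [Finset.mem_product, Finset.mem_range]
    omega
  have hcard := Finset.card_le_card hsub
  rw [List.toFinset_card_of_nodup hmnd] at hcard
  simpa [Finset.card_product] using hcard

theorem reach_subset (g : List (List Char)) (n m : Int) (s : Int × Int)
    (visF : List (Int × Int)) (hs : s ∈ visF)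
    (hcl : ∀ c ∈ visF, ∀ d ∈ pvNbrsB c, pvGood g n m d → d ∈ visF) :
    ∀ c, pvReach g n m s c → c ∈ visF := by
  intro c h
  induction h with
  | refl => exact hs
  | step _ hd hg ih => exact hcl _ ih _ hd hg

-- the BFS loop of A ----------------------------------------------------------------------------
theorem pvBfsA_run (g : List (List Char)) (n m : Int) (s : Int × Int) :
    ∀ (fuel : Nat) (q : List (Int × Int)) (vis : PySem.Set (Int × Int)) (snow : Int),
    vis.Nodup →
    (∀ c ∈ vis, pvInb n m c) →
    (∀ c ∈ q, c ∈ vis) →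
    (∀ c ∈ vis, c ∉ q → ∀ d ∈ pvNbrsB c, pvGood g n m d → d ∈ vis) →
    (∀ c ∈ vis, pvReach g n m s c) →
    q.length + (n.toNat * m.toNat - vis.length) ≤ fuel →
    ∃ visF : List (Int × Int),
      pvBfsA g n m fuel q vis snow = (visF, snow + (pvDotCount g (visF.drop vis.length) : Int)) ∧
      vis <+: visF ∧ visF.Nodup ∧
      (∀ c ∈ visF, pvReach g n m s c) ∧
      (∀ c ∈ visF, ∀ d ∈ pvNbrsB c, pvGood g n m d → d ∈ visF) := by
  intro fuel
  induction fuel with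
  | zero =>
    intro q vis snow hnd hinb hq hcl hr hfuel
    have hq0 : q = [] := by
      cases q with
      | nil => rfl
      | cons a t => simp at hfuel
    subst hq0
    refine ⟨vis, ?_, List.prefix_refl _, hnd, hr, ?_⟩
    · simp [pvBfsA, pvDotCount]
    · intro c hc d hd hg
      exact hcl c hc (by simp) d hd hg
  | succ fuel ih =>
    intro q vis snow hnd hinb hq hcl hr hfuel
    cases q with
    | nil =>
      refine ⟨vis, by simp [pvBfsA, pvDotCount], List.prefix_refl _, hnd, hr, ?_⟩
      intro c hc d hd hg
      exact hcl c hc (by simp) d hd hg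
    | cons hd0 t =>
      obtain ⟨x, y⟩ := hd0
      obtain ⟨new, heq, hnd2, hmem, hcov⟩ := foldA_spec g n m x y t vis snow hnd
      have hxy : (x, y) ∈ vis := hq _ (by simp)
      have hinb2 : ∀ c ∈ vis ++ new, pvInb n m c := by
        intro c hc
        rcases List.mem_append.mp hc with h | h
        · exact hinb c h
        · exact (hmem c h).2.1.1
      have hq2 : ∀ c ∈ t ++ new, c ∈ vis ++ new := by
        intro c hc
        rcases List.mem_append.mp hc with h | h
        · exact List.mem_append_left _ (hq c (by simp [h]))
        · exact List.mem_append_right _ h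
      have hcl2 : ∀ c ∈ vis ++ new, c ∉ t ++ new →
          ∀ d ∈ pvNbrsB c, pvGood g n m d → d ∈ vis ++ new := by
        intro c hc hcn d hd hg
        rcases List.mem_append.mp hc with h | h
        · by_cases hcxy : c = (x, y)
          · subst hcxy; exact hcov d hd hg
          · have hnt : c ∉ (x, y) :: t := by
              intro hmem'
              rcases List.mem_cons.mp hmem' with h' | h'
              · exact hcxy h'
              · exact hcn (List.mem_append_left _ h')
            exact List.mem_append_left _ (hcl c h hnt d hd hg)
        · exact absurd (List.mem_append_right t h) hcn
      have hr2 : ∀ c ∈ vis ++ new, pvReach g n m s c := by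
        intro c hc
        rcases List.mem_append.mp hc with h | h
        · exact hr c h
        · obtain ⟨h1, h2, _⟩ := hmem c h
          exact pvReach.step (hr _ hxy) h1 h2
      have hcard1 := pvInb_card n m vis hnd hinb
      have hcard2 := pvInb_card n m (vis ++ new) hnd2 hinb2
      have hfuel2 : (t ++ new).length + (n.toNat * m.toNat - (vis ++ new).length) ≤ fuel := by
        simp only [List.length_append, List.length_cons] at hfuel hcard2 ⊢
        omega
      obtain ⟨visF, heqF, hpre, hndF, hrF, hclF⟩ :=
        ih (t ++ new) (vis ++ new) (snow + (pvDotCount g new : Int)) hnd2 hinb2 hq2 hcl2 hr2 hfuel2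
      obtain ⟨rest, hrest⟩ := hpre
      refine ⟨visF, ?_, (List.prefix_append vis new).trans ⟨rest, hrest⟩, hndF, hrF, hclF⟩
      simp only [pvBfsA, heq]
      rw [heqF, ← hrest]
      have h1 : ((vis ++ new) ++ rest).drop vis.length = new ++ rest := by
        rw [List.append_assoc]
        exact List.drop_left
      have h2 : ((vis ++ new) ++ rest).drop (vis ++ new).length = rest := List.drop_left
      rw [h1, h2, pvDotCount_append]
      congr 1
      push_cast
      ring

-- the DFS loop of B ----------------------------------------------------------------------------
theorem pvDfsB_run (g : List (List Char)) (n m : Int) (s : Int × Int) :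
    ∀ (fuel : Nat) (stack : List (Int × Int)) (seen : PySem.Set (Int × Int)),
    seen.Nodup →
    (∀ c ∈ seen, pvInb n m c) →
    (∀ c ∈ stack, c ∈ seen) →
    (∀ c ∈ seen, c ∉ stack → ∀ d ∈ pvNbrsB c, pvGood g n m d → d ∈ seen) →
    (∀ c ∈ seen, pvReach g n m s c) →
    stack.length + (n.toNat * m.toNat - seen.length) ≤ fuel →
    ∃ seenF : List (Int × Int),
      pvDfsB g n m fuel stack seen = seenF ∧
      seen ⊆ seenF ∧ seenF.Nodup ∧
      (∀ c ∈ seenF, pvReach g n m s c) ∧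
      (∀ c ∈ seenF, ∀ d ∈ pvNbrsB c, pvGood g n m d → d ∈ seenF) := by
  intro fuel
  induction fuel with
  | zero =>
    intro stack seen hnd hinb hq hcl hr hfuel
    have hq0 : stack = [] := by
      cases stack with
      | nil => rfl
      | cons a t => simp at hfuel
    subst hq0
    refine ⟨seen, by simp [pvDfsB], fun _ h => h, hnd, hr, ?_⟩
    intro c hc d hd hg
    exact hcl c hc (by simp) d hd hg
  | succ fuel ih =>
    intro stack seen hnd hinb hq hcl hr hfuel
    cases hlast : stack.getLast? with
    | none =>
      have h0 : stack = [] := List.getLast?_eq_none_iff.mp hlast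
      subst h0
      refine ⟨seen, by simp [pvDfsB], fun _ h => h, hnd, hr, ?_⟩
      intro c hc d hd hg
      exact hcl c hc (by simp) d hd hg
    | some c =>
      obtain ⟨ys, rfl⟩ := List.getLast?_eq_some_iff.mp hlast
      have hcseen : c ∈ seen := hq c (by simp)
      obtain ⟨new, heq, hnd2, hmem, hcov⟩ := foldB_spec g n m (pvNbrsB c) ys seen hnd
      have hinb2 : ∀ e ∈ seen ++ new, pvInb n m e := by
        intro e he
        rcases List.mem_append.mp he with h | h
        · exact hinb e h
        · exact (hmem e h).2.1.1
      have hq2 : ∀ e ∈ ys ++ new, e ∈ seen ++ new := by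
        intro e he
        rcases List.mem_append.mp he with h | h
        · exact List.mem_append_left _ (hq e (by simp [h]))
        · exact List.mem_append_right _ h
      have hcl2 : ∀ e ∈ seen ++ new, e ∉ ys ++ new →
          ∀ d ∈ pvNbrsB e, pvGood g n m d → d ∈ seen ++ new := by
        intro e he hen d hd hg
        rcases List.mem_append.mp he with h | h
        · by_cases hec : e = c
          · subst hec; exact hcov d hd hg
          · have hnt : e ∉ ys ++ [c] := by
              intro hmem'
              rcases List.mem_append.mp hmem' with h' | h'
              · exact hen (List.mem_append_left _ h')
              · exact hec (by simpa using h')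
            exact List.mem_append_left _ (hcl e h hnt d hd hg)
        · exact absurd (List.mem_append_right ys h) hen
      have hr2 : ∀ e ∈ seen ++ new, pvReach g n m s e := by
        intro e he
        rcases List.mem_append.mp he with h | h
        · exact hr e h
        · obtain ⟨h1, h2, _⟩ := hmem e h
          exact pvReach.step (hr _ hcseen) h1 h2
      have hcard1 := pvInb_card n m seen hnd hinb
      have hcard2 := pvInb_card n m (seen ++ new) hnd2 hinb2
      have hfuel2 : (ys ++ new).length + (n.toNat * m.toNat - (seen ++ new).length) ≤ fuel := by
        simp only [List.length_append, List.length_cons] at hfuel hcard2 ⊢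
        omega
      obtain ⟨seenF, heqF, hsub, hndF, hrF, hclF⟩ :=
        ih (ys ++ new) (seen ++ new) hnd2 hinb2 hq2 hcl2 hr2 hfuel2
      refine ⟨seenF, ?_, fun e he => hsub (List.mem_append_left _ he), hndF, hrF, hclF⟩
      have hdl : (ys ++ [c]).dropLast = ys := by simp
      simp only [pvDfsB, hlast, hdl, heq]
      exact heqF

-- region sizes agree: A's snow+1 equals B's 1 + |'.' cells of the region| ----------------------
theorem region_eq (g : List (List Char)) (n m : Int) (s : Int × Int)
    (hs : pvInb n m s) (ho : pvCellA g s.1 s.2 = 'o') :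
    pvMaxSizeA g n m s = pvRegionB g n m s := by
  have hnd : ([s] : List (Int × Int)).Nodup := by simp
  have hinb : ∀ c ∈ ([s] : List (Int × Int)), pvInb n m c := by
    intro c hc
    simp only [List.mem_singleton] at hc
    subst hc
    exact hs
  have hq : ∀ c ∈ ([s] : List (Int × Int)), c ∈ ([s] : List (Int × Int)) := fun _ h => h
  have hcl : ∀ c ∈ ([s] : List (Int × Int)), c ∉ ([s] : List (Int × Int)) →
      ∀ d ∈ pvNbrsB c, pvGood g n m d → d ∈ ([s] : List (Int × Int)) := by
    intro c hc hcn
    exact absurd hc hcn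
  have hr : ∀ c ∈ ([s] : List (Int × Int)), pvReach g n m s c := by
    intro c hc
    simp only [List.mem_singleton] at hc
    subst hc
    exact pvReach.refl
  have hfuel : ([s] : List (Int × Int)).length +
      (n.toNat * m.toNat - ([s] : List (Int × Int)).length) ≤ n.toNat * m.toNat + 1 := by
    simp
    omega
  obtain ⟨visF, hA, hpreA, hndA, hrA, hclA⟩ :=
    pvBfsA_run g n m s (n.toNat * m.toNat + 1) [s] [s] 0 hnd hinb hq hcl hr hfuel
  obtain ⟨seenF, hB, hsubB, hndB, hrB, hclB⟩ :=
    pvDfsB_run g n m s (n.toNat * m.toNat + 1) [s] [s] hnd hinb hq hcl hr hfuel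
  have hsA : s ∈ visF := hpreA.subset (by simp)
  have hsB : s ∈ seenF := hsubB (by simp)
  have hmemIff : ∀ c, c ∈ visF ↔ c ∈ seenF := by
    intro c
    constructor
    · intro h
      exact reach_subset g n m s seenF hsB hclB c (hrA c h)
    · intro h
      exact reach_subset g n m s visF hsA hclA c (hrB c h)
  have hperm : visF.Perm seenF := (List.perm_ext_iff_of_nodup hndA hndB).2 hmemIff
  obtain ⟨rest, hrest⟩ := hpreA
  have hdropA : visF.drop ([s] : List (Int × Int)).length = rest := by
    rw [← hrest]
    exact List.drop_left
  have hdots : pvDotCount g visF = pvDotCount g rest := by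
    rw [← hrest]
    simp [pvDotCount, ho]
  have hcount : pvDotCount g visF = (seenF.filter (fun c => pvCharB g c == '.')).length := by
    have hfl := (hperm.filter (fun c => pvCellA g c.1 c.2 == '.')).length_eq
    have hpredeq : (fun c : Int × Int => pvCharB g c == '.') =
        (fun c : Int × Int => pvCellA g c.1 c.2 == '.') := rfl
    rw [hpredeq]
    simpa [pvDotCount] using hfl
  have hofl : (PySem.Set.ofList [s] : PySem.Set (Int × Int)) = [s] := rfl
  unfold pvMaxSizeA pvRegionB
  rw [hofl, hA, hB]
  simp only []
  rw [hdropA]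
  have : pvDotCount g rest = (seenF.filter (fun c => pvCharB g c == '.')).length := by
    rw [← hdots, hcount]
  omega

-- the snowball scans agree ---------------------------------------------------------------------
theorem snowballs_eq (g : List (List Char)) (n m : Int) :
    pvSnowballsA g n m =
      (PySem.List.pyRange 0 n 1).flatMap (fun i =>
        ((PySem.List.pyRange 0 m 1).filter (fun j => pvCharB g (i, j) == 'o')).map
          (fun j => ((i, j) : Int × Int))) := by
  unfold pvSnowballsA
  have hinner : ∀ (acc : List (Int × Int)) (i : Int),
      (PySem.List.pyRange 0 m 1).foldl
          (fun acc j => if pvCellA g i j = 'o' then acc ++ [(i, j)] else acc) acc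
        = acc ++ ((PySem.List.pyRange 0 m 1).filter (fun j => pvCharB g (i, j) == 'o')).map
            (fun j => ((i, j) : Int × Int)) := by
    intro acc i
    rw [PySem.List.foldl_append_ite (p := fun j => pvCellA g i j = 'o')
      (f := fun j => ((i, j) : Int × Int))]
    have hpred : (fun j : Int => pvCharB g (i, j) == 'o') =
        (fun j : Int => decide (pvCellA g i j = 'o')) := by
      funext j
      exact beq_char (pvCellA g i j) 'o'
    rw [hpred]
  have houter :
      (PySem.List.pyRange 0 n 1).foldl
          (fun acc i => (PySem.List.pyRange 0 m 1).foldl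
            (fun acc j => if pvCellA g i j = 'o' then acc ++ [(i, j)] else acc) acc) []
        = (PySem.List.pyRange 0 n 1).foldl
          (fun acc i => acc ++ ((PySem.List.pyRange 0 m 1).filter
            (fun j => pvCharB g (i, j) == 'o')).map (fun j => ((i, j) : Int × Int))) [] :=
    PySem.List.foldl_congr_mem _ _ _ _ (fun acc i _ => hinner acc i)
  rw [houter, PySem.List.foldl_append_eq_flatMap]
  simp

theorem snowballs_mem (g : List (List Char)) (n m : Int) :
    ∀ c ∈ pvSnowballsA g n m, pvInb n m c ∧ pvCellA g c.1 c.2 = 'o' := by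
  intro c hc
  rw [snowballs_eq] at hc
  simp only [List.mem_flatMap, List.mem_map, List.mem_filter,
    PySem.List.mem_pyRange_one] at hc
  obtain ⟨i, ⟨hi0, hin⟩, j, ⟨⟨hj0, hjm⟩, hpred⟩, rfl⟩ := hc
  refine ⟨⟨hi0, hin, hj0, hjm⟩, ?_⟩
  simpa [beq_char, pvCharB, pvCellA] using hpred

-- one row: index-range filter length is a take-count --------------------------------------------
theorem filter_len_count (cs : List Char) : ∀ (M : Nat), M ≤ cs.length →
    ((PySem.List.pyRange 0 (M : Int) 1).filter (fun j => cs.getD j.toNat '#' == 'o')).length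
      = (cs.take M).count 'o' := by
  intro M
  induction M with
  | zero =>
    intro _
    simp
  | succ M ih =>
    intro hM
    have hcast : ((M + 1 : Nat) : Int) = (M : Int) + 1 := by push_cast; ring
    rw [hcast, PySem.List.pyRange_one_succ_right (by positivity)]
    rw [List.filter_append, List.length_append, ih (by omega)]
    have hMlt : M < cs.length := by omega
    have hget : cs[M]? = some cs[M] := List.getElem?_eq_getElem hMlt
    rw [List.take_add_one, hget, List.count_append]
    by_cases ho : cs[M] = 'o' <;> simp [List.filter, hget, beq_char, ho]

theorem snowballs_length (grid : List String) (hne : grid ≠ [])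
    (hrows : ∀ r ∈ grid, (grid.headI).toList.length ≤ r.toList.length) :
    (pvSnowballsA (pvGridA grid) ((pvGridA grid).length : Int)
        (((pvGridA grid).getD 0 []).length : Int)).length
      = (grid.map (fun r => (r.toList.take (grid.headI).toList.length).count 'o')).sum := by
  set g := pvGridA grid with hg
  set M : Nat := (g.getD 0 []).length with hM
  have hhead : g.getD 0 [] = (grid.headI).toList := by
    cases grid with
    | nil => exact absurd rfl hne
    | cons r gr => rfl
  have hrows' : ∀ row ∈ g, M ≤ row.length := by
    intro row hrow
    obtain ⟨r, hr, rfl⟩ := List.mem_map.mp hrow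
    rw [hM, hhead]
    exact hrows r hr
  rw [snowballs_eq, List.length_flatMap,
    PySem.List.pyRange_zero ((g.length : Int)), List.map_map]
  have hlen : ((g.length : Int)).toNat = g.length := by simp
  rw [hlen]
  have hmain : (List.range g.length).map
      ((fun i => (((PySem.List.pyRange 0 ((M : Nat) : Int) 1).filter
          (fun j => pvCharB g (i, j) == 'o')).map (fun j => ((i, j) : Int × Int))).length)
        ∘ (fun k : Nat => (k : Int)))
      = g.map (fun row => (row.take M).count 'o') := by
    apply List.ext_getElem
    · simp
    · intro k hk1 hk2
      simp only [List.getElem_map, List.getElem_range, Function.comp_apply, List.length_map]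
      have hklt : k < g.length := by simpa using hk2
      have hrowmem : g[k] ∈ g := List.getElem_mem _
      have hpred : (fun j : Int => pvCharB g ((k : Int), j) == 'o') =
          (fun j : Int => (g[k]).getD j.toNat '#' == 'o') := by
        funext j
        have : pvCharB g ((k : Int), j) = (g[k]).getD j.toNat '#' := by
          simp [pvCharB, List.getElem?_eq_getElem hklt]
        rw [this]
      rw [hpred, filter_len_count g[k] M (hrows' _ hrowmem)]
  rw [hmain, hg, pvGridA, List.map_map]
  refine congrArg List.sum (List.map_congr_left ?_)
  intro r hr
  simp only [Function.comp_apply, hM, hhead]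

-- closed form of the accumulation loop ---------------------------------------------------------
theorem sum_min (h : Int) (hh : 1 ≤ h) : ∀ (k : Nat),
    2 * (((PySem.List.pyRange 1 ((k : Int) + 1) 1).map (fun body => min body h)).sum) =
      min (k : Int) h * (min (k : Int) h + 1) + 2 * (((k : Int) - min (k : Int) h) * h) := by
  intro k
  induction k with
  | zero =>
    rw [min_eq_left (by omega : (((0 : Nat) : Int)) ≤ h)]
    simp
  | succ k ih =>
    have hcast : ((k + 1 : Nat) : Int) = (k : Int) + 1 := by push_cast; ring
    rw [hcast]
    have hrange : PySem.List.pyRange 1 ((k : Int) + 1 + 1) 1 =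
        PySem.List.pyRange 1 ((k : Int) + 1) 1 ++ [(k : Int) + 1] :=
      PySem.List.pyRange_one_succ_right (by omega)
    rw [hrange, List.map_append, List.sum_append]
    simp only [List.map_cons, List.map_nil, List.sum_cons, List.sum_nil]
    by_cases hle : (k : Int) + 1 ≤ h
    · rw [min_eq_left hle, min_eq_left (show (k : Int) ≤ h by omega)] at *
      linear_combination ih
    · rw [min_eq_right (show h ≤ (k : Int) + 1 by omega),
        min_eq_right (show h ≤ (k : Int) by omega)] at *
      linear_combination ih

theorem regionB_pos (g : List (List Char)) (n m : Int) (s : Int × Int) :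
    1 ≤ pvRegionB g n m s := by
  simp only [pvRegionB]
  omega

theorem sum_closed (a b : Int) (ha : 1 ≤ a) (hb : 1 ≤ b) :
    (PySem.List.pyRange 1 (max a b + 1) 1).foldl
        (fun answer body => answer + min body (min a b)) 0 =
      PySem.Int.floordiv (min a b * (min a b + 1)) 2 + (max a b - min a b) * min a b := by
  set h := min a b with hhd
  set bd := max a b with hbdd
  have hh : 1 ≤ h := le_min ha hb
  have hbd : h ≤ bd := min_le_max
  have hk : ((bd.toNat : Int)) = bd := Int.toNat_of_nonneg (by omega)
  have hsum := sum_min h hh bd.toNat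
  rw [hk, min_eq_right hbd] at hsum
  rw [PySem.List.foldl_add]
  have hfd : PySem.Int.floordiv (h * (h + 1)) 2 = h * (h + 1) / 2 :=
    PySem.Int.floordiv_eq_ediv_of_pos (by norm_num)
  have hdvd : (2 : Int) ∣ h * (h + 1) := (Int.even_mul_succ_self h).two_dvd
  have hcan : h * (h + 1) / 2 * 2 = h * (h + 1) := Int.ediv_mul_cancel hdvd
  rw [hfd]
  linarith [hsum, hcan]

-- ===== VERDICT (by name: the statement is the Claim_ definition above) =====
theorem solution_spec : Claim_equal_solution := by
  intro grid _ hpre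
  obtain ⟨hne, hrows, hcount⟩ := hpre
  show solution grid = solution_alt grid
  simp only [solution, solution_alt]
  have hgg : pvGridB grid = pvGridA grid := rfl
  rw [hgg]
  set g : List (List Char) := pvGridA grid with hgdef
  set n : Int := (g.length : Int) with hndef
  set m : Int := ((g.getD 0 []).length : Int) with hmdef
  have hL : (pvSnowballsA g n m).length
      = (grid.map (fun r => (r.toList.take (grid.headI).toList.length).count 'o')).sum :=
    snowballs_length grid hne hrows
  have hlen2 : 2 ≤ (pvSnowballsA g n m).length := by
    rw [hL]
    exact hcount
  obtain ⟨c0, c1, tl, hLs⟩ : ∃ c0 c1 tl, pvSnowballsA g n m = c0 :: c1 :: tl := by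
    rcases hx : pvSnowballsA g n m with _ | ⟨c0, _ | ⟨c1, tl⟩⟩
    · rw [hx] at hlen2; simp at hlen2
    · rw [hx] at hlen2; simp at hlen2
    · exact ⟨c0, c1, tl, rfl⟩
  have hp0 := snowballs_mem g n m c0 (by simp [hLs])
  have hp1 := snowballs_mem g n m c1 (by simp [hLs])
  have hr0 := region_eq g n m c0 hp0.1 hp0.2
  have hr1 := region_eq g n m c1 hp1.1 hp1.2
  have hstarts : pvStartsB g n m = (pvSnowballsA g n m).take 2 := by
    unfold pvStartsB
    rw [← snowballs_eq]
  rw [hstarts, hLs]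
  simp only [List.take, List.getD, List.getElem?_cons_zero, List.getElem?_cons_succ,
    Option.getD_some]
  rw [hr0, hr1]
  exact sum_closed _ _ (regionB_pos g n m c0) (regionB_pos g n m c1)
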